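-- pv_equiv track=rewrite | github.com/matteogrimaldiuni/ADM-HW1 | scripts.py | can_stack_cubes
-- ===== SOURCE A (Python) =====
-- def can_stack_cubes(test_cases):
--     results = []
--
--     for cubes in test_cases:
--         n, blocks = cubes
--         left = 0
--         right = n - 1
--         prev_cube = float('inf')
--         valid = True
--
--         while left <= right:
--             if blocks[left] >= blocks[right] and blocks[left] <= prev_cube:
--                 prev_cube = blocks[left]
--                 left += 1
--             elif blocks[right] >= blocks[left] and blocks[right] <= prev_cube:
--                 prev_cube = blocks[right]
--                 right -= 1
--             else:
--                 valid = False
--                 break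
--
--         results.append("Yes" if valid else "No")
--
--     return results
-- ===== SOURCE B (Python) =====
-- def can_stack_cubes(test_cases):
--     results = []
--     for n, blocks in test_cases:
--         verdict = "Yes"
--         rising = False
--         for i in range(1, n):
--             if blocks[i] > blocks[i - 1]:
--                 rising = True
--             elif rising and blocks[i] < blocks[i - 1]:
--                 verdict = "No"
--                 break
--         results.append(verdict)
--     return results
-- ===== Notes on version B (the rewrite author's own statement) =====
-- stated objective: simpler
-- what changed: Replaces the two-pointer inward peel with prev_cube accumulator by a single left-to-right scan of the first n blocks keeping only a boolean 'rising' flag: a strict rise followed by a strict fall means not stackable (the valley-shape characterization of the greedy).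
import Mathlib
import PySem

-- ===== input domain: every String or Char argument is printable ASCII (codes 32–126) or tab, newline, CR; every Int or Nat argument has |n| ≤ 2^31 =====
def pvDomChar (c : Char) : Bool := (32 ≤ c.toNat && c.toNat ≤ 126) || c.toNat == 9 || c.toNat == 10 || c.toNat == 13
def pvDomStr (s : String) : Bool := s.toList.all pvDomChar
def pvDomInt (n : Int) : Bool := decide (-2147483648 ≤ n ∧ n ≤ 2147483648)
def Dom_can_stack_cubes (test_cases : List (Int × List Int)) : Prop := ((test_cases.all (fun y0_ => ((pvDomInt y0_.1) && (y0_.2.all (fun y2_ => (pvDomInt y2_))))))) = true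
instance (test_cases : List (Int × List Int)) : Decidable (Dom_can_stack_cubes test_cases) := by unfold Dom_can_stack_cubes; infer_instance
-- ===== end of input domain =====

-- B replaces A's two-pointer inward peel (prev_cube accumulator) with a single
-- left-to-right scan of blocks[0:n] keeping one boolean 'rising' flag (simpler).

-- ===== PORT A =====
-- prev_cube starts as float('inf'): modelled as Option Int, none = infinity.
def pvLe (x : Int) (p : Option Int) : Bool :=
  match p with
  | none => true
  | some v => decide (x ≤ v)

-- A's while loop; blocks[left]/blocks[right] via pyGet? (none = IndexError, excluded by Pre_).
def loopA (blocks : List Int) (l r : Int) (prev : Option Int) : Bool :=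
  if _h : l ≤ r then
    match PySem.List.pyGet? blocks l, PySem.List.pyGet? blocks r with
    | some bl, some br =>
      if br ≤ bl && pvLe bl prev then loopA blocks (l + 1) r (some bl)
      else if bl ≤ br && pvLe br prev then loopA blocks l (r - 1) (some br)
      else false
    | _, _ => false
  else true
termination_by (r + 1 - l).toNat
decreasing_by all_goals omega

def can_stack_cubes (test_cases : List (Int × List Int)) : List String :=
  test_cases.map (fun cubes =>
    if loopA cubes.2 0 (cubes.1 - 1) none then "Yes" else "No")

-- ===== PORT B =====
-- B's for-i-in-range(1,n) scan with the 'rising' flag; early break = returning false.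
def loopB (blocks : List Int) (i n : Int) (rising : Bool) : Bool :=
  if _h : i < n then
    match PySem.List.pyGet? blocks i, PySem.List.pyGet? blocks (i - 1) with
    | some cur, some prev =>
      if prev < cur then loopB blocks (i + 1) n true
      else if rising && cur < prev then false
      else loopB blocks (i + 1) n rising
    | _, _ => false
  else true
termination_by (n - i).toNat
decreasing_by all_goals omega

def can_stack_cubes_alt (test_cases : List (Int × List Int)) : List String :=
  test_cases.map (fun cubes =>
    if loopB cubes.2 1 cubes.1 false then "Yes" else "No")

-- ===== PRECONDITION & SPEC =====
-- Pre_ excludes exactly the inputs where A raises IndexError: a case whose count n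
-- exceeds the number of blocks (then blocks[n-1] is out of range).
def Pre_can_stack_cubes (test_cases : List (Int × List Int)) : Prop :=
  ∀ c ∈ test_cases, c.1 ≤ (c.2.length : Int)
instance (test_cases : List (Int × List Int)) : Decidable (Pre_can_stack_cubes test_cases) := by
  unfold Pre_can_stack_cubes; infer_instance

def pvWitness_can_stack_cubes : (List (Int × List Int)) := [(3, [4, 2, 3]), (3, [1, 3, 2])]

def Spec_can_stack_cubes (test_cases : List (Int × List Int)) (out : List String) : Prop := out = can_stack_cubes_alt test_cases
instance (test_cases : List (Int × List Int)) (out : List String) : Decidable (Spec_can_stack_cubes test_cases out) := by unfold Spec_can_stack_cubes; infer_instance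

-- ===== CLAIM (what is proved, stated in full; the proofs are below) =====
def Claim_equal_can_stack_cubes : Prop := ∀ (test_cases : List (Int × List Int)), Dom_can_stack_cubes test_cases → Pre_can_stack_cubes test_cases → Spec_can_stack_cubes test_cases (can_stack_cubes test_cases)

-- ===== LEMMAS AND PROOFS =====

-- List-level model of B's scan carrying the final flag (none = failed).
def scanS (p : Int) (l : List Int) (r : Bool) : Option Bool :=
  match l with
  | [] => some r
  | x :: t => if p < x then scanS x t true else if r && x < p then none else scanS x t r

-- "valley-shaped": B's verdict on a whole list.
def vB (w : List Int) : Bool :=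
  match w with
  | [] => true
  | x :: t => (scanS x t false).isSome

-- List-level model of A's greedy peel on the window, cap p.
def gL (w : List Int) (p : Option Int) : Bool :=
  match w with
  | [] => true
  | x :: xs =>
    let y := xs.getLastD x
    if y ≤ x && pvLe x p then gL xs (some x)
    else if x ≤ y && pvLe y p then gL (x :: xs).dropLast (some y)
    else false
termination_by w.length
decreasing_by all_goals simp

-- both ends of the window are ≤ the cap
def eB (w : List Int) (p : Option Int) : Bool :=
  match w, p with
  | [], _ => true
  | _, none => true
  | x :: xs, some q => decide (x ≤ q) && decide (xs.getLastD x ≤ q)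

theorem scanS_true_flag (l : List Int) : ∀ (p : Int) (b : Bool), scanS p l true = some b → b = true := by
  induction l with
  | nil => intro p b h; simpa [scanS] using h.symm
  | cons x t ih =>
    intro p b h
    by_cases hx : p < x
    · exact ih x b (by simpa [scanS, hx] using h)
    · by_cases hx2 : x < p
      · simp [scanS, hx, hx2] at h
      · exact ih x b (by simpa [scanS, hx, hx2] using h)

theorem scanS_true_last (l : List Int) : ∀ (p : Int), (scanS p l true).isSome → p ≤ l.getLastD p := by
  induction l with
  | nil => intro p _; simp
  | cons x t ih =>
    intro p h
    rw [List.getLastD_cons]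
    by_cases hx : p < x
    · have := ih x (by simpa [scanS, hx] using h)
      omega
    · by_cases hx2 : x < p
      · simp [scanS, hx, hx2] at h
      · have := ih x (by simpa [scanS, hx, hx2] using h)
        omega

theorem scanS_false_flat (l : List Int) : ∀ (p : Int), scanS p l false = some false → l.getLastD p ≤ p := by
  induction l with
  | nil => intro p _; simp
  | cons x t ih =>
    intro p h
    rw [List.getLastD_cons]
    by_cases hx : p < x
    · have := scanS_true_flag t x false (by simpa [scanS, hx] using h)
      simp at this
    · have := ih x (by simpa [scanS, hx] using h)
      omega

theorem scanS_snoc (l : List Int) : ∀ (p : Int) (r : Bool) (y : Int),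
    scanS p (l ++ [y]) r = (scanS p l r).bind (fun r' =>
      if l.getLastD p < y then some true
      else if r' && y < l.getLastD p then none else some r') := by
  induction l with
  | nil => intro p r y; simp [scanS]
  | cons x t ih =>
    intro p r y
    have hL : (x :: t).getLastD p = t.getLastD x := by rw [List.getLastD_cons]
    by_cases hx : p < x
    · simp only [List.cons_append, scanS, if_pos hx]
      rw [ih x true y, hL]
    · by_cases hx2 : (r && decide (x < p)) = true
      · simp only [List.cons_append, scanS, if_neg hx, if_pos hx2, Option.bind]
      · simp only [List.cons_append, scanS, if_neg hx, if_neg hx2]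
        rw [ih x r y, hL]

-- peel the head: x at least the last element
theorem vB_cons_head (x z : Int) (t : List Int) (hlast : t.getLastD z ≤ x) :
    (scanS x (z :: t) false).isSome = ((scanS z t false).isSome && decide (z ≤ x)) := by
  by_cases hx : x < z
  · have h1 : (scanS x (z :: t) false) = scanS z t true := by simp [scanS, hx]
    rw [h1]
    cases hs : scanS z t true with
    | none => simp [hx]
    | some b =>
      have hb := scanS_true_flag t z b hs
      have := scanS_true_last t z (by simp [hs])
      omega
  · have h1 : (scanS x (z :: t) false) = scanS z t false := by simp [scanS, hx]
    rw [h1]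
    have : decide (z ≤ x) = true := by simp; omega
    rw [this, Bool.and_true]

-- peel the last: strictly larger than the head
theorem vB_snoc (l : List Int) (x y : Int) (hxy : x < y) :
    (scanS x (l ++ [y]) false).isSome = ((scanS x l false).isSome && decide (l.getLastD x ≤ y)) := by
  rw [scanS_snoc l x false y]
  set L := l.getLastD x with hL
  cases hs : scanS x l false with
  | none => simp
  | some r' =>
    cases r' with
    | false =>
      have h2 : L ≤ x := hL ▸ scanS_false_flat l x hs
      have h1 : decide (L ≤ y) = true := by simp; omega
      by_cases hly : L < y
      · simp [hly, h1]
      · simp [hly, h1]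
    | true =>
      by_cases hly : L < y
      · simp [hly]; omega
      · by_cases hey : y < L
        · simp [hly, hey]
        · simp [hly, hey]; omega

theorem dropLast_cons_ne (x : Int) (xs : List Int) (h : xs ≠ []) :
    (x :: xs).dropLast = x :: xs.dropLast := by
  cases xs with
  | nil => exact absurd rfl h
  | cons z t => rfl

theorem getLastD_of_ne_nil (xs : List Int) (x : Int) (h : xs ≠ []) :
    xs.getLastD x = xs.getLast h := by
  rw [List.getLastD_eq_getLast?, List.getLast?_eq_some_getLast h, Option.getD_some]

-- main: the greedy equals valley-check plus cap-check
theorem gL_eq (w : List Int) : ∀ (p : Option Int), gL w p = (vB w && eB w p) := by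
  induction hn : w.length using Nat.strong_induction_on generalizing w with
  | _ n ih =>
    intro p
    match w with
    | [] => simp [gL, vB, eB]
    | x :: xs =>
      rw [gL]
      set y := xs.getLastD x with hy
      by_cases h1 : y ≤ x ∧ pvLe x p = true
      · have hrec := ih xs.length (by simp [← hn]) xs rfl (some x)
        rw [if_pos (by simp [h1.1, h1.2]), hrec]
        have heB : eB (x :: xs) p = true := by
          cases p with
          | none => rfl
          | some q =>
            have hxq : x ≤ q := by simpa [pvLe] using h1.2
            show (decide (x ≤ q) && decide (xs.getLastD x ≤ q)) = true
            rw [← hy]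
            simp only [Bool.and_eq_true, decide_eq_true_eq]
            omega
        rw [heB, Bool.and_true]
        match xs with
        | [] => simp [vB, eB, scanS]
        | z :: t =>
          have hy2 : y = t.getLastD z := by rw [hy, List.getLastD_cons]
          have hlast : t.getLastD z ≤ x := by rw [← hy2]; exact h1.1
          have hv : vB (x :: z :: t) = ((scanS z t false).isSome && decide (z ≤ x)) :=
            vB_cons_head x z t hlast
          rw [hv]
          show ((scanS z t false).isSome && (decide (z ≤ x) && decide (t.getLastD z ≤ x))) = _
          have hd : decide (t.getLastD z ≤ x) = true := by simp only [decide_eq_true_eq]; exact hlast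
          rw [hd, Bool.and_true]
      · by_cases h2 : x ≤ y ∧ pvLe y p = true
        · have hxy : x < y := by
            rcases lt_or_ge x y with h | h
            · exact h
            · refine absurd ?_ h1
              have hxe : x = y := by omega
              exact ⟨by omega, by rw [hxe]; exact h2.2⟩
          have hxs : xs ≠ [] := by
            intro he
            rw [he] at hy
            simp at hy
            omega
          rw [if_neg (by
                simp only [Bool.and_eq_true, decide_eq_true_eq]
                intro hc
                have hxe : x = y := by omega
                exact h1 ⟨hc.1, by rw [hxe]; exact h2.2⟩),
              if_pos (by simp [h2.1, h2.2])]
          have hsplit : xs = xs.dropLast ++ [y] := by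
            conv_lhs => rw [← List.dropLast_append_getLast hxs]
            rw [hy, getLastD_of_ne_nil xs x hxs]
          set l := xs.dropLast with hl
          have hdl : (x :: xs).dropLast = x :: l := by
            rw [hl]
            exact dropLast_cons_ne x xs hxs
          have hlen : (x :: l).length < n := by
            have hd1 : l.length = xs.length - 1 := by rw [hl, List.length_dropLast]
            have hd2 : xs.length ≠ 0 := by simpa using hxs
            simp only [List.length_cons] at hn ⊢
            omega
          have hrec := ih (x :: l).length hlen (x :: l) rfl (some y)
          rw [hdl, hrec]
          have heB : eB (x :: xs) p = true := by
            cases p with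
            | none => rfl
            | some q =>
              have hyq : y ≤ q := by simpa [pvLe] using h2.2
              show (decide (x ≤ q) && decide (xs.getLastD x ≤ q)) = true
              rw [← hy]
              simp only [Bool.and_eq_true, decide_eq_true_eq]
              omega
          rw [heB, Bool.and_true]
          have hv : vB (x :: xs) = ((scanS x l false).isSome && decide (l.getLastD x ≤ y)) := by
            show (scanS x xs false).isSome = _
            conv_lhs => rw [hsplit]
            exact vB_snoc l x y hxy
          rw [hv]
          show ((scanS x l false).isSome && (decide (x ≤ y) && decide (l.getLastD x ≤ y))) = _
          have hd : decide (x ≤ y) = true := by simp only [decide_eq_true_eq]; omega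
          rw [hd, Bool.true_and]
        · rw [if_neg (by
                simp only [Bool.and_eq_true, decide_eq_true_eq]
                intro hc
                exact h1 ⟨hc.1, hc.2⟩),
              if_neg (by
                simp only [Bool.and_eq_true, decide_eq_true_eq]
                intro hc
                exact h2 ⟨hc.1, hc.2⟩)]
          symm
          cases p with
          | none =>
            exfalso
            rcases le_total x y with h | h
            · exact h2 ⟨h, rfl⟩
            · exact h1 ⟨h, rfl⟩
          | some q =>
            have hq : q < x ∨ q < y := by
              by_contra hc
              push Not at hc
              rcases le_total x y with h | h
              · refine h2 ⟨h, ?_⟩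
                simp only [pvLe, decide_eq_true_eq]
                omega
              · refine h1 ⟨h, ?_⟩
                simp only [pvLe, decide_eq_true_eq]
                omega
            have he : eB (x :: xs) (some q) = (decide (x ≤ q) && decide (xs.getLastD x ≤ q)) := rfl
            rw [he, ← hy]
            have hff : (decide (x ≤ q) && decide (y ≤ q)) = false := by
              rcases hq with h | h <;> simp only [Bool.and_eq_false_iff, decide_eq_false_iff_not] <;> omega
            rw [hff, Bool.and_false]

-- ===== bridges from the index loops to the list-level functions =====

-- the window blocks[l..r] as a list
def W (blocks : List Int) (l r : Int) : List Int :=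
  (blocks.drop l.toNat).take (r - l + 1).toNat

theorem W_len (blocks : List Int) (l r : Int) (h0 : 0 ≤ l) (hr : r < (blocks.length : Int)) :
    (W blocks l r).length = (r - l + 1).toNat := by
  simp only [W, List.length_take, List.length_drop]
  omega

theorem W_empty (blocks : List Int) (l r : Int) (h : r < l) : W blocks l r = [] := by
  have hz : (r - l + 1).toNat = 0 := by omega
  simp [W, hz]

theorem W_cons (blocks : List Int) (l r : Int) (h0 : 0 ≤ l) (hlr : l ≤ r)
    (hr : r < (blocks.length : Int)) :
    W blocks l r = blocks[l.toNat]'(by omega) :: W blocks (l + 1) r := by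
  have ha : l.toNat < blocks.length := by omega
  have hk : (r - l + 1).toNat = (r - l).toNat + 1 := by omega
  rw [W, hk, ← List.getElem_cons_drop, List.take_succ_cons]
  have e1 : (l + 1).toNat = l.toNat + 1 := by omega
  have e2 : (r - (l + 1) + 1).toNat = (r - l).toNat := by omega
  rw [W, e1, e2]

theorem W_getLastD (blocks : List Int) (l r : Int) (d : Int) (h0 : 0 ≤ l) (hlr : l ≤ r)
    (hr : r < (blocks.length : Int)) :
    (W blocks l r).getLastD d = blocks[r.toNat]'(by omega) := by
  have hlen : (W blocks l r).length = (r - l + 1).toNat := W_len blocks l r h0 hr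
  have hne : W blocks l r ≠ [] := by
    intro he
    rw [he] at hlen
    simp at hlen
    omega
  rw [getLastD_of_ne_nil _ _ hne, List.getLast_eq_getElem]
  have hidx : (W blocks l r).length - 1 < (W blocks l r).length := by
    rw [hlen]; omega
  simp only [W, List.getElem_take, List.getElem_drop]
  have hixx : l.toNat + ((W blocks l r).length - 1) = r.toNat := by
    rw [hlen]; omega
  simp only [W] at hixx
  simp only [hixx]

theorem W_dropLast (blocks : List Int) (l r : Int) (h0 : 0 ≤ l)
    (hr : r < (blocks.length : Int)) :
    (W blocks l r).dropLast = W blocks l (r - 1) := by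
  rw [List.dropLast_eq_take, W_len blocks l r h0 hr]
  rw [W, W, List.take_take]
  congr 1
  omega

theorem bridgeA_aux (blocks : List Int) (k : Nat) : ∀ (l r : Int) (prev : Option Int),
    (r + 1 - l).toNat ≤ k → 0 ≤ l → r < (blocks.length : Int) →
    loopA blocks l r prev = gL (W blocks l r) prev := by
  induction k with
  | zero =>
    intro l r prev hk h0 hr
    have hrl : r < l := by omega
    rw [loopA, dif_neg (by omega), W_empty blocks l r hrl, gL]
  | succ k ih =>
    intro l r prev hk h0 hr
    by_cases hlr : l ≤ r
    · have ha : l.toNat < blocks.length := by omega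
      have hb : 0 ≤ r := by omega
      have hg1 : PySem.List.pyGet? blocks l = some (blocks[l.toNat]'ha) :=
        PySem.List.pyGet?_eq_some_getElem blocks h0 (by omega)
      have hg2 : PySem.List.pyGet? blocks r = some (blocks[r.toNat]'(by omega)) :=
        PySem.List.pyGet?_eq_some_getElem blocks hb hr
      rw [loopA, dif_pos hlr]
      simp only [hg1, hg2]
      rw [W_cons blocks l r h0 hlr hr, gL]
      have hlast : (W blocks (l + 1) r).getLastD (blocks[l.toNat]'ha) = blocks[r.toNat]'(by omega) := by
        by_cases hle : l + 1 ≤ r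
        · exact W_getLastD blocks (l + 1) r _ (by omega) hle hr
        · have heq : l = r := by omega
          rw [W_empty blocks (l + 1) r (by omega)]
          simp only [List.getLastD_nil]
          congr 1
          omega
      rw [hlast]
      by_cases c1 : (decide (blocks[r.toNat]'(by omega) ≤ blocks[l.toNat]'ha) && pvLe (blocks[l.toNat]'ha) prev) = true
      · rw [if_pos c1, if_pos c1]
        exact ih (l + 1) r (some (blocks[l.toNat]'ha)) (by omega) (by omega) hr
      · rw [if_neg c1, if_neg c1]
        by_cases c2 : (decide (blocks[l.toNat]'ha ≤ blocks[r.toNat]'(by omega)) && pvLe (blocks[r.toNat]'(by omega)) prev) = true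
        · rw [if_pos c2, if_pos c2]
          have hdl : (blocks[l.toNat]'ha :: W blocks (l + 1) r).dropLast = W blocks l (r - 1) := by
            rw [← W_cons blocks l r h0 hlr hr, W_dropLast blocks l r h0 hr]
          rw [hdl]
          exact ih l (r - 1) (some (blocks[r.toNat]'(by omega))) (by omega) h0 (by omega)
        · rw [if_neg c2, if_neg c2]
    · rw [loopA, dif_neg hlr, W_empty blocks l r (by omega), gL]

theorem bridgeB_aux (blocks : List Int) (k : Nat) : ∀ (i n : Int) (rising : Bool),
    (n - i).toNat ≤ k → 1 ≤ i → n ≤ (blocks.length : Int) →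
    loopB blocks i n rising =
      (scanS (blocks.getD (i - 1).toNat 0) (W blocks i (n - 1)) rising).isSome := by
  induction k with
  | zero =>
    intro i n rising hk h1 hn
    have hni : n ≤ i := by omega
    rw [loopB, dif_neg (by omega), W_empty blocks i (n - 1) (by omega), scanS]
    rfl
  | succ k ih =>
    intro i n rising hk h1 hn
    by_cases hin : i < n
    · have ha : i.toNat < blocks.length := by omega
      have hb : (i - 1).toNat < blocks.length := by omega
      have hg1 : PySem.List.pyGet? blocks i = some (blocks[i.toNat]'ha) :=
        PySem.List.pyGet?_eq_some_getElem blocks (by omega) (by omega)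
      have hg2 : PySem.List.pyGet? blocks (i - 1) = some (blocks[(i - 1).toNat]'hb) :=
        PySem.List.pyGet?_eq_some_getElem blocks (by omega) (by omega)
      have hgd : blocks.getD (i - 1).toNat 0 = blocks[(i - 1).toNat]'hb :=
        List.getD_eq_getElem blocks 0 hb
      rw [loopB, dif_pos hin]
      simp only [hg1, hg2]
      rw [hgd]
      rw [W_cons blocks i (n - 1) (by omega) (by omega) (by omega), scanS]
      have hnext : blocks.getD ((i + 1) - 1).toNat 0 = blocks[i.toNat]'ha := by
        have e : ((i + 1) - 1).toNat = i.toNat := by omega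
        rw [e]
        exact List.getD_eq_getElem blocks 0 ha
      by_cases c1 : blocks[(i - 1).toNat]'hb < blocks[i.toNat]'ha
      · simp only [if_pos c1]
        rw [ih (i + 1) n true (by omega) (by omega) hn, hnext]
      · simp only [if_neg c1]
        by_cases c2 : (rising && decide (blocks[i.toNat]'ha < blocks[(i - 1).toNat]'hb)) = true
        · simp only [if_pos c2]
          rfl
        · simp only [if_neg c2]
          rw [ih (i + 1) n rising (by omega) (by omega) hn, hnext]
    · rw [loopB, dif_neg hin, W_empty blocks i (n - 1) (by omega), scanS]
      rfl

theorem eB_none (w : List Int) : eB w none = true := by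
  cases w <;> rfl

theorem case_eq (n : Int) (blocks : List Int) (h : n ≤ (blocks.length : Int)) :
    loopA blocks 0 (n - 1) none = loopB blocks 1 n false := by
  by_cases hn1 : n ≤ 0
  · rw [loopA, dif_neg (by omega), loopB, dif_neg (by omega)]
  · have h1n : 1 ≤ n := by omega
    rw [bridgeA_aux blocks (n - 1 + 1 - 0).toNat 0 (n - 1) none le_rfl (by omega) (by omega)]
    rw [bridgeB_aux blocks (n - 1).toNat 1 n false (by omega) le_rfl h]
    rw [gL_eq, eB_none, Bool.and_true]
    cases blocks with
    | nil => simp at h; omega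
    | cons b0 rest =>
      have hW0 : W (b0 :: rest) 0 (n - 1) = b0 :: rest.take (n - 1).toNat := by
        rw [W_cons (b0 :: rest) 0 (n - 1) le_rfl (by omega) (by omega)]
        have e1 : (b0 :: rest)[(0 : Int).toNat] = b0 := rfl
        rw [e1, W]
        have e2 : ((0 : Int) + 1).toNat = 1 := by omega
        have e3 : (n - 1 - (0 + 1) + 1).toNat = (n - 1).toNat := by omega
        rw [e2, e3]
        rfl
      have hW1 : W (b0 :: rest) 1 (n - 1) = rest.take (n - 1).toNat := by
        rw [W]
        have e2 : (1 : Int).toNat = 1 := rfl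
        have e3 : (n - 1 - 1 + 1).toNat = (n - 1).toNat := by omega
        rw [e2, e3]
        rfl
      rw [hW0, hW1]
      rfl

-- ===== VERDICT (by name: the statement is the Claim_ definition above) =====
theorem can_stack_cubes_spec : Claim_equal_can_stack_cubes := by
  intro tc hdom hpre
  unfold Spec_can_stack_cubes can_stack_cubes can_stack_cubes_alt
  unfold Pre_can_stack_cubes at hpre
  clear hdom
  revert hpre
  induction tc with
  | nil => intro _; rfl
  | cons c t ih =>
    intro hpre
    simp only [List.map_cons]
    rw [case_eq c.1 c.2 (hpre c (List.mem_cons_self)),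
        ih (fun d hd => hpre d (List.mem_cons_of_mem c hd))]
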